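-- pv_equiv track=rewrite | github.com/trmttm/fmCalculator | fm_calculator/UseCase/SortRPE.py | get_sorted_rpes
-- ===== SOURCE A (Python) =====
-- def get_sorted_rpes(rpes: dict, order_of_calculation: tuple, direct_links: tuple) -> dict:
--     sorted_rpes = {}
--     tos = direct_links_destination = tuple(to for (f, to, s) in direct_links)
--     froms = tuple(f for (f, to, s) in direct_links)
--     tos_to_froms = dict(zip(tos, froms))
--
--     for account in order_of_calculation:
--         if account in rpes:
--             rpe = rpes[account]
--             sorted_rpes[account] = rpe
--         elif account in direct_links_destination:
--             sorted_rpes[account] = (tos_to_froms[account],)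
--     return sorted_rpes
-- ===== SOURCE B (Python) =====
-- def get_sorted_rpes(rpes: dict, order_of_calculation: tuple, direct_links: tuple) -> dict:
--     # Inverted traversal: instead of scanning order_of_calculation and looking each
--     # account up, index the order once (first-occurrence positions), then iterate the
--     # resolution entries themselves and SORT them by their position in the order.
--     resolved = {to: (f,) for (f, to, s) in direct_links}
--     resolved.update(rpes)
--
--     pos = {}
--     for i, account in enumerate(order_of_calculation):
--         if account not in pos:
--             pos[account] = i
--
--     entries = [(account, value) for account, value in resolved.items() if account in pos]
--     entries.sort(key=lambda kv: pos[kv[0]])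
--     return dict(entries)
-- ===== Notes on version B (the rewrite author's own statement) =====
-- stated objective: faster
-- what changed: B inverts the traversal: instead of scanning order_of_calculation and resolving each account (A's per-account two-branch lookup with an O(n) tuple scan), it builds a first-occurrence position index of the order once, then iterates the merged resolution entries themselves, filters to indexed accounts, and SORTS them by position - a sort-then-emit algorithm over the data instead of a scan over the order.
import Mathlib
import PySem

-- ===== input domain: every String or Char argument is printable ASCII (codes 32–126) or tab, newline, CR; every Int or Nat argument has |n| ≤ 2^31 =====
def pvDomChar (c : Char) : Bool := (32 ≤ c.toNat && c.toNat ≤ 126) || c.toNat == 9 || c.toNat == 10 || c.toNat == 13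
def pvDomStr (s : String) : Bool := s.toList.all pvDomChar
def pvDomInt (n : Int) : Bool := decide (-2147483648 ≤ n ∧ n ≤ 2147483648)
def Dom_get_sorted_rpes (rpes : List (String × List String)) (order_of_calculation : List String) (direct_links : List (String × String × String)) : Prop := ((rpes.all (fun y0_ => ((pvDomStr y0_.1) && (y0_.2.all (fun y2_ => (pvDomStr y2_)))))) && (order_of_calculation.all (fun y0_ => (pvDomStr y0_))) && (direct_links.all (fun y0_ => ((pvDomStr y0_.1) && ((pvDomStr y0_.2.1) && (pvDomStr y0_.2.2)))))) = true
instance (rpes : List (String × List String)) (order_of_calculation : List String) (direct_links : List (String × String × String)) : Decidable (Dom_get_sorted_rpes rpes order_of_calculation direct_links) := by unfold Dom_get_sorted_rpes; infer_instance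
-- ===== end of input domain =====

-- B inverts the traversal: it indexes the order once (first-occurrence positions), then iterates the
-- merged resolution entries themselves and sorts them by position, instead of A's per-account scan.

-- ===== PORT A =====
def get_sorted_rpes (rpes : List (String × List String)) (order_of_calculation : List String) (direct_links : List (String × String × String)) : List (String × List String) :=
  let tos := direct_links.map (fun l => l.2.1)          -- direct_links_destination
  let froms := direct_links.map (fun l => l.1)
  let tos_to_froms : PySem.Dict String String := PySem.Dict.ofList (List.zip tos froms)
  let rpesD : PySem.Dict String (List String) := PySem.Dict.mk rpes
  (order_of_calculation.foldl (fun sorted_rpes account =>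
      match rpesD.get? account with
      | some rpe => sorted_rpes.insert account rpe
      | none =>
        if account ∈ tos then
          match tos_to_froms.get? account with
          | some f => sorted_rpes.insert account [f]
          | none => sorted_rpes                       -- unreachable: account ∈ tos
        else sorted_rpes)
    PySem.Dict.empty).items

-- ===== PORT B =====
def get_sorted_rpes_alt (rpes : List (String × List String)) (order_of_calculation : List String) (direct_links : List (String × String × String)) : List (String × List String) :=
  let resolved : PySem.Dict String (List String) :=
    (direct_links.foldl (fun d l => d.insert l.2.1 [l.1]) PySem.Dict.empty).update rpes
  let pos : PySem.Dict String Int :=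
    (PySem.List.enumerate order_of_calculation 0).foldl
      (fun p ia => if p.contains ia.2 then p else p.insert ia.2 ia.1) PySem.Dict.empty
  let entries := resolved.items.filter (fun kv => pos.contains kv.1)
  -- key lambda pos[kv[0]]: ported as getD with default 0, exact because every filtered key is in pos
  let sortedEntries := PySem.List.sorted entries (fun kv => pos.getD kv.1 0) false
  (PySem.Dict.ofList sortedEntries).items

-- ===== PRECONDITION & SPEC =====
-- Pre_ excludes association lists for the dict parameter `rpes` with duplicate keys: a Python
-- dict cannot have duplicate keys, so such lists do not denote any input of A.
def Pre_get_sorted_rpes (rpes : List (String × List String)) (order_of_calculation : List String) (direct_links : List (String × String × String)) : Prop :=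
  (rpes.map Prod.fst).Nodup
instance (rpes : List (String × List String)) (order_of_calculation : List String) (direct_links : List (String × String × String)) : Decidable (Pre_get_sorted_rpes rpes order_of_calculation direct_links) := by unfold Pre_get_sorted_rpes; infer_instance
def pvWitness_get_sorted_rpes : (List (String × List String)) × List String × (List (String × String × String)) :=
  ([("a", ["b", "c"])], ["a", "d", "e"], [("b", "d", "+"), ("c", "d", "-")])

def Spec_get_sorted_rpes (rpes : List (String × List String)) (order_of_calculation : List String) (direct_links : List (String × String × String)) (out : List (String × List String)) : Prop := out = get_sorted_rpes_alt rpes order_of_calculation direct_links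
instance (rpes : List (String × List String)) (order_of_calculation : List String) (direct_links : List (String × String × String)) (out : List (String × List String)) : Decidable (Spec_get_sorted_rpes rpes order_of_calculation direct_links out) := by unfold Spec_get_sorted_rpes; infer_instance

-- ===== CLAIM (what is proved, stated in full; the proofs are below) =====
def Claim_equal_get_sorted_rpes : Prop := ∀ (rpes : List (String × List String)) (order_of_calculation : List String) (direct_links : List (String × String × String)), Dom_get_sorted_rpes rpes order_of_calculation direct_links → Pre_get_sorted_rpes rpes order_of_calculation direct_links → Spec_get_sorted_rpes rpes order_of_calculation direct_links (get_sorted_rpes rpes order_of_calculation direct_links)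

-- ===== LEMMAS AND PROOFS =====

-- Proof-side abbreviations: A's loop rewritten over the merged lookup table, and the
-- first-occurrence index of a key in a list.
def pvAF (R : PySem.Dict String (List String)) (ooc : List String) : PySem.Dict String (List String) :=
  ooc.foldl (fun d a => match R.get? a with | some v => d.insert a v | none => d) PySem.Dict.empty

def pvFirstIdx : List String → Int → String → Option Int
  | [], _, _ => none
  | a :: rest, s, k => if k = a then some s else pvFirstIdx rest (s + 1) k

-- A-side lookup lemmas: A's two-branch lookup equals one lookup in the merged table.
lemma linksFold_get? (links : List (String × String × String)) (d1 : PySem.Dict String String)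
    (d2 : PySem.Dict String (List String)) (h : ∀ a, d2.get? a = (d1.get? a).map (fun f => [f])) :
    ∀ a, (links.foldl (fun d l => d.insert l.2.1 [l.1]) d2).get? a
      = (((List.zip (links.map (fun l => l.2.1)) (links.map (fun l => l.1))).foldl
            (fun d p => d.insert p.1 p.2) d1).get? a).map (fun f => [f]) := by
  induction links generalizing d1 d2 with
  | nil => simpa using h
  | cons l rest ih =>
    intro a
    refine ih (d1.insert l.2.1 l.1) (d2.insert l.2.1 [l.1]) (fun b => ?_) a
    by_cases hb : b = l.2.1 <;> simp [PySem.Dict.get?_insert, hb, h b]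


lemma pairsFold_get?_none (ps : List (String × String)) (d1 : PySem.Dict String String) :
    ∀ a, ((ps.foldl (fun d p => d.insert p.1 p.2) d1).get? a) = none ↔
      (a ∉ ps.map Prod.fst ∧ d1.get? a = none) := by
  induction ps generalizing d1 with
  | nil => simp
  | cons l rest ih =>
    intro a
    rw [List.foldl_cons, ih]
    by_cases hb : a = l.1 <;> simp [PySem.Dict.get?_insert, hb]


lemma update_get? (rpes : List (String × List String)) (d : PySem.Dict String (List String))
    (h : (rpes.map Prod.fst).Nodup) :
    ∀ a, (d.update rpes).get? a
      = match (PySem.Dict.mk rpes).get? a with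
        | some v => some v
        | none => d.get? a := by
  induction rpes generalizing d with
  | nil => intro a; simp [PySem.Dict.update, PySem.Dict.get?]
  | cons p rest ih =>
    intro a
    simp only [List.map_cons, List.nodup_cons] at h
    have step : (d.update (p :: rest)) = ((d.insert p.1 p.2).update rest) := rfl
    rw [step, ih _ h.2 a, PySem.Dict.get?_mk_cons]
    by_cases hb : a = p.1
    · subst hb
      have hnone : (PySem.Dict.mk rest).get? p.1 = none := by
        rw [PySem.Dict.get?_eq_none_iff_not_mem_keys]
        simpa using h.1
      simp [hnone, PySem.Dict.get?_insert_self]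
    · have hne : (p.1 == a) = false := by simp [Ne.symm hb]
      simp only [hne, Bool.false_eq_true, if_false]
      cases (PySem.Dict.mk rest).get? a with
      | some v => rfl
      | none => simp [PySem.Dict.get?_insert, hb]


lemma posFold_get? (ooc : List String) (s : Int) (d : PySem.Dict String Int) (k : String) :
    ((PySem.List.enumerate ooc s).foldl
        (fun p ia => if p.contains ia.2 then p else p.insert ia.2 ia.1) d).get? k
      = match d.get? k with
        | some j => some j
        | none => pvFirstIdx ooc s k := by
  induction ooc generalizing s d with
  | nil => simp [pvFirstIdx, PySem.List.enumerate]; cases d.get? k <;> rfl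
  | cons a rest ih =>
    rw [PySem.List.enumerate_cons, List.foldl_cons, ih]
    by_cases hc : d.contains a = true
    · simp only [hc, if_true]
      by_cases hk : k = a
      · subst hk
        have : (d.get? k).isSome := by rw [← PySem.Dict.contains_eq_isSome_get?]; exact hc
        cases hg : d.get? k with
        | none => rw [hg] at this; simp at this
        | some j => simp [pvFirstIdx]
      · simp [pvFirstIdx, hk]
    · simp only [hc, if_false, Bool.false_eq_true]
      have hd : d.get? a = none := by
        cases hg : d.get? a with
        | none => simp [hg]
        | some j => exfalso; apply hc; rw [PySem.Dict.contains_eq_isSome_get?, hg]; rfl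
      by_cases hk : k = a
      · subst hk
        simp [PySem.Dict.get?_insert, hd, pvFirstIdx]
      · simp [PySem.Dict.get?_insert, hk, pvFirstIdx]


lemma firstIdx_isSome (ooc : List String) (s : Int) (k : String) :
    (pvFirstIdx ooc s k).isSome = true ↔ k ∈ ooc := by
  induction ooc generalizing s with
  | nil => simp [pvFirstIdx]
  | cons a rest ih =>
    by_cases hk : k = a <;> simp [pvFirstIdx, hk, ih]


lemma firstIdx_bounds (ooc : List String) (s : Int) (k : String) (j : Int)
    (h : pvFirstIdx ooc s k = some j) : s ≤ j ∧ j < s + ooc.length := by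
  induction ooc generalizing s with
  | nil => simp [pvFirstIdx] at h
  | cons a rest ih =>
    by_cases hk : k = a
    · simp [pvFirstIdx, hk] at h; subst h; simp
    · simp [pvFirstIdx, hk] at h
      have := ih (s + 1) h
      simp; omega


lemma firstIdx_append (xs ys : List String) (s : Int) (k : String) :
    pvFirstIdx (xs ++ ys) s k
      = match pvFirstIdx xs s k with
        | some j => some j
        | none => pvFirstIdx ys (s + xs.length) k := by
  induction xs generalizing s with
  | nil => simp [pvFirstIdx]
  | cons a rest ih =>
    by_cases hk : k = a
    · simp [pvFirstIdx, hk]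
    · simp only [List.cons_append, pvFirstIdx, hk, if_false, ih]
      have : s + 1 + (rest.length : Int) = s + ((rest.length : Int) + 1) := by ring
      simp [this]


lemma AF_nodup_keys (R : PySem.Dict String (List String)) (ooc : List String) :
    (pvAF R ooc).keys.Nodup := by
  unfold pvAF
  suffices h : ∀ d : PySem.Dict String (List String), d.keys.Nodup →
      (ooc.foldl (fun d a => match R.get? a with | some v => d.insert a v | none => d) d).keys.Nodup from
    h _ PySem.Dict.nodup_keys_empty
  induction ooc with
  | nil => intro d hd; simpa using hd
  | cons a rest ih =>
    intro d hd
    rw [List.foldl_cons]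
    apply ih
    cases R.get? a with
    | some v => exact PySem.Dict.nodup_keys_insert _ _ _ hd
    | none => exact hd


lemma AF_get? (R : PySem.Dict String (List String)) (ooc : List String) (k : String) :
    (pvAF R ooc).get? k = if k ∈ ooc then R.get? k else none := by
  unfold pvAF
  suffices h : ∀ d : PySem.Dict String (List String),
      (ooc.foldl (fun d a => match R.get? a with | some v => d.insert a v | none => d) d).get? k
        = if k ∈ ooc ∧ (R.get? k).isSome then R.get? k else d.get? k by
    rw [h PySem.Dict.empty]
    by_cases hm : k ∈ ooc
    · cases hg : R.get? k with
      | some v => simp [hm, hg]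
      | none => simp [hm, hg, PySem.Dict.get?_empty]
    · simp [hm, PySem.Dict.get?_empty]
  induction ooc with
  | nil => intro d; simp
  | cons a rest ih =>
    intro d
    rw [List.foldl_cons, ih]
    by_cases hr : k ∈ rest
    · by_cases hs : (R.get? k).isSome
      · simp [hr, hs]
      · simp only [hr, true_and, hs, if_false, Bool.false_eq_true]
        cases hg : R.get? a with
        | none => simp [hg]
        | some v =>
          have hka : k ≠ a := by rintro rfl; rw [hg] at hs; simp at hs
          simp [PySem.Dict.get?_insert, hka]
    · by_cases hk : k = a
      · subst hk
        cases hg : R.get? k with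
        | some v => simp [hr, hg, PySem.Dict.get?_insert]
        | none => simp [hr, hg]
      · have : ¬ (k ∈ a :: rest) := by simp [hk, hr]
        simp only [hr, false_and, if_false, this]
        cases hg : R.get? a with
        | some v => simp [PySem.Dict.get?_insert, hk]
        | none => simp


lemma AF_keys_mem (R : PySem.Dict String (List String)) (ooc : List String)
    (p : String × List String) (hp : p ∈ (pvAF R ooc).items) : p.1 ∈ ooc := by
  have h := PySem.Dict.get?_of_mem_items _ hp (AF_nodup_keys R ooc)
  rw [AF_get?] at h
  by_cases hm : p.1 ∈ ooc
  · exact hm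
  · simp [hm] at h


lemma firstIdx_append_of_mem (init : List String) (a k : String) (hk : k ∈ init) :
    pvFirstIdx (init ++ [a]) 0 k = pvFirstIdx init 0 k := by
  rw [firstIdx_append]
  cases hg : pvFirstIdx init 0 k with
  | some j => rfl
  | none =>
    exfalso
    have := (firstIdx_isSome init 0 k).mpr hk
    rw [hg] at this
    simp at this


lemma AF_pairwise (R : PySem.Dict String (List String)) (hR : R.keys.Nodup) (ooc : List String) :
    (pvAF R ooc).items.Pairwise
      (fun p q => (pvFirstIdx ooc 0 p.1).getD 0 < (pvFirstIdx ooc 0 q.1).getD 0) := by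
  induction ooc using List.reverseRecOn with
  | nil => simp [pvAF, PySem.Dict.empty]
  | append_singleton init a ih =>
    have hstep : pvAF R (init ++ [a])
        = match R.get? a with
          | some v => (pvAF R init).insert a v
          | none => pvAF R init := by
      simp [pvAF, List.foldl_append]
    have htrans : ∀ {items : List (String × List String)},
        (∀ p ∈ items, p.1 ∈ init) →
        items.Pairwise (fun p q => (pvFirstIdx init 0 p.1).getD 0 < (pvFirstIdx init 0 q.1).getD 0) →
        items.Pairwise (fun p q => (pvFirstIdx (init ++ [a]) 0 p.1).getD 0 < (pvFirstIdx (init ++ [a]) 0 q.1).getD 0) := by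
      intro items hmem hpw
      refine hpw.imp_of_mem (fun {p q} hp hq hlt => ?_)
      rw [firstIdx_append_of_mem init a p.1 (hmem p hp),
          firstIdx_append_of_mem init a q.1 (hmem q hq)]
      exact hlt
    rw [hstep]
    cases hg : R.get? a with
    | none => exact htrans (fun p hp => AF_keys_mem R init p hp) ih
    | some v =>
      by_cases hc : (pvAF R init).contains a = true
      · rw [PySem.Dict.items_insert_of_contains _ v hc]
        have hid : (pvAF R init).items.map (fun p => if (p.1 == a) = true then (a, v) else p)
            = (pvAF R init).items := by
          have h1 : (pvAF R init).items.map (fun p => if (p.1 == a) = true then (a, v) else p)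
              = (pvAF R init).items.map id := by
            apply List.map_congr_left
            intro p hp
            by_cases hpa : p.1 = a
            · have hgp := PySem.Dict.get?_of_mem_items _ hp (AF_nodup_keys R init)
              have hma : p.1 ∈ init := AF_keys_mem R init p hp
              rw [AF_get?, if_pos hma, hpa, hg] at hgp
              obtain ⟨k, w⟩ := p
              simp only at hpa
              subst hpa
              simp only [beq_self_eq_true, if_true, id]
              simp only [Option.some.injEq] at hgp
              rw [hgp]
            · simp [hpa]
          rw [h1, List.map_id]
        rw [hid]
        exact htrans (fun p hp => AF_keys_mem R init p hp) ih
      · rw [PySem.Dict.items_insert_of_not_contains _ v (by simpa using hc)]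
        have hna : a ∉ init := by
          intro hma
          apply hc
          rw [PySem.Dict.contains_eq_isSome_get?, AF_get?, if_pos hma, hg]
          rfl
        rw [List.pairwise_append]
        refine ⟨htrans (fun p hp => AF_keys_mem R init p hp) ih, by simp, ?_⟩
        intro p hp q hq
        simp only [List.mem_singleton] at hq
        subst hq
        have hkey_a : pvFirstIdx (init ++ [a]) 0 a = some (init.length : Int) := by
          rw [firstIdx_append]
          have hnone : pvFirstIdx init 0 a = none := by
            cases hg' : pvFirstIdx init 0 a with
            | none => rfl
            | some j =>
              exfalso
              have := (firstIdx_isSome init 0 a).mp (by rw [hg']; rfl)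
              exact hna this
          rw [hnone]
          simp [pvFirstIdx]
        have hmp : p.1 ∈ init := AF_keys_mem R init p hp
        rw [firstIdx_append_of_mem init a p.1 hmp, hkey_a]
        cases hg' : pvFirstIdx init 0 p.1 with
        | none =>
          exfalso
          have := (firstIdx_isSome init 0 p.1).mpr hmp
          rw [hg'] at this; simp at this
        | some j =>
          have hb := firstIdx_bounds init 0 p.1 j hg'
          simp only [Option.getD_some]
          omega


lemma A_eq_AF (rpes : List (String × List String)) (ooc : List String)
    (links : List (String × String × String)) (hpre : (rpes.map Prod.fst).Nodup) :
    get_sorted_rpes rpes ooc links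
      = (pvAF ((links.foldl (fun d l => d.insert l.2.1 [l.1]) PySem.Dict.empty).update rpes) ooc).items := by
  unfold get_sorted_rpes pvAF
  simp only []
  congr 1
  apply List.foldl_ext
  intro acc account _
  have hlink := linksFold_get? links PySem.Dict.empty PySem.Dict.empty (by simp) account
  have hmem := pairsFold_get?_none
    (List.zip (links.map (fun l => l.2.1)) (links.map (fun l => l.1))) PySem.Dict.empty account
  have hfst : (List.zip (links.map (fun l => l.2.1)) (links.map (fun l => l.1))).map Prod.fst
      = links.map (fun l => l.2.1) := List.map_fst_zip (by simp)
  rw [update_get? rpes _ hpre account]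
  cases hA : (PySem.Dict.mk rpes).get? account with
  | some v => rfl
  | none =>
    simp only []
    by_cases ht : account ∈ links.map (fun l => l.2.1)
    · simp only [ht, if_true]
      cases hz : ((List.zip (links.map (fun l => l.2.1)) (links.map (fun l => l.1))).foldl
          (fun d p => d.insert p.1 p.2) (PySem.Dict.empty : PySem.Dict String String)).get? account with
      | some f =>
        have hzo : (PySem.Dict.ofList (List.zip (links.map (fun l => l.2.1))
            (links.map (fun l => l.1)))).get? account = some f := hz
        rw [hzo, hlink, hz]
        rfl
      | none =>
        exact absurd ((hmem.mp hz).1) (by rw [hfst]; exact fun h => h ht)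
    · simp only [ht, if_false]
      have hzn : ((List.zip (links.map (fun l => l.2.1)) (links.map (fun l => l.1))).foldl
          (fun d p => d.insert p.1 p.2) (PySem.Dict.empty : PySem.Dict String String)).get? account
          = none := hmem.mpr ⟨by rw [hfst]; exact ht, by simp⟩
      rw [hlink, hzn]
      rfl


lemma AB_eq (rpes : List (String × List String)) (ooc : List String)
    (links : List (String × String × String)) (hpre : (rpes.map Prod.fst).Nodup) :
    get_sorted_rpes rpes ooc links = get_sorted_rpes_alt rpes ooc links := by
  rw [A_eq_AF rpes ooc links hpre]
  unfold get_sorted_rpes_alt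
  simp only []
  set R := (links.foldl (fun d l => d.insert l.2.1 [l.1]) PySem.Dict.empty).update rpes with hR
  set pos := (PySem.List.enumerate ooc 0).foldl
      (fun p ia => if p.contains ia.2 then p else p.insert ia.2 ia.1) PySem.Dict.empty with hposdef
  have hRnodup : R.keys.Nodup := by
    apply PySem.Dict.nodup_keys_update
    exact PySem.Dict.nodup_keys_foldl_insert_key links (fun l => l.2.1) (fun d l => [l.1]) _
      PySem.Dict.nodup_keys_empty
  have hpos_get : ∀ k, pos.get? k = pvFirstIdx ooc 0 k := by
    intro k
    rw [hposdef, posFold_get?]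
    simp [PySem.Dict.get?_empty]
  have hpos_contains : ∀ k, pos.contains k = true ↔ k ∈ ooc := by
    intro k
    rw [PySem.Dict.contains_eq_isSome_get?, hpos_get, firstIdx_isSome]
  set entries := R.items.filter (fun kv => pos.contains kv.1) with hentries
  have hAFitemsNodup : (pvAF R ooc).items.Nodup := by
    apply List.Nodup.of_map Prod.fst
    have := AF_nodup_keys R ooc
    simpa [PySem.Dict.keys] using this
  have hRitemsFstNodup : (R.items.map Prod.fst).Nodup := by
    simpa [PySem.Dict.keys] using hRnodup
  have hEntriesNodup : entries.Nodup := by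
    exact List.Nodup.filter _ (List.Nodup.of_map Prod.fst hRitemsFstNodup)
  have hmemiff : ∀ p, p ∈ (pvAF R ooc).items ↔ p ∈ entries := by
    intro p
    constructor
    · intro hp
      have hg := PySem.Dict.get?_of_mem_items _ hp (AF_nodup_keys R ooc)
      rw [AF_get?] at hg
      by_cases hm : p.1 ∈ ooc
      · rw [if_pos hm] at hg
        rw [hentries, List.mem_filter]
        obtain ⟨k, v⟩ := p
        exact ⟨(PySem.Dict.get?_eq_some_iff_mem_items R k v hRnodup).mp hg,
          by simpa using (hpos_contains k).mpr hm⟩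
      · rw [if_neg hm] at hg; exact absurd hg (by simp)
    · intro hp
      rw [hentries, List.mem_filter] at hp
      obtain ⟨k, v⟩ := p
      have hg : R.get? k = some v := (PySem.Dict.get?_eq_some_iff_mem_items R k v hRnodup).mpr hp.1
      have hm : k ∈ ooc := (hpos_contains k).mp (by simpa using hp.2)
      have : (pvAF R ooc).get? k = some v := by rw [AF_get?, if_pos hm]; exact hg
      exact (PySem.Dict.get?_eq_some_iff_mem_items _ k v (AF_nodup_keys R ooc)).mp this
  have hperm : (pvAF R ooc).items.Perm entries :=
    (List.perm_ext_iff_of_nodup hAFitemsNodup hEntriesNodup).mpr hmemiff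
  have hpw : (pvAF R ooc).items.Pairwise
      (fun p q => (fun kv : String × List String => pos.getD kv.1 0) p
        < (fun kv : String × List String => pos.getD kv.1 0) q) := by
    refine (AF_pairwise R hRnodup ooc).imp (fun {p q} h => ?_)
    simpa [PySem.Dict.getD_eq_get?_getD, hpos_get] using h
  have hsorted : PySem.List.sorted entries (fun kv => pos.getD kv.1 0) = (pvAF R ooc).items :=
    PySem.List.sorted_eq_of_perm_of_pairwise_lt entries _ _ hperm hpw
  have hEntriesFstNodup : (entries.map Prod.fst).Nodup :=
    List.Sublist.nodup (List.Sublist.map Prod.fst List.filter_sublist) hRitemsFstNodup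
  have hsortNodupFst : ((PySem.List.sorted entries (fun kv => pos.getD kv.1 0) false).map Prod.fst).Nodup := by
    have hp : (PySem.List.sorted entries (fun kv => pos.getD kv.1 0) false).Perm entries :=
      PySem.List.sorted_perm entries _ false
    exact ((hp.map Prod.fst).nodup_iff).mpr hEntriesFstNodup
  have hitems : (PySem.Dict.ofList (PySem.List.sorted entries (fun kv => pos.getD kv.1 0) false)).items
      = PySem.List.sorted entries (fun kv => pos.getD kv.1 0) false := by
    have h := PySem.Dict.items_foldl_insert_fresh
        (PySem.List.sorted entries (fun kv => pos.getD kv.1 0) false) Prod.fst Prod.snd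
        (PySem.Dict.empty : PySem.Dict String (List String))
        (fun a _ => by simp [PySem.Dict.contains_empty]) hsortNodupFst
    simpa [PySem.Dict.ofList, PySem.Dict.update, PySem.Dict.empty] using h
  rw [hitems, hsorted]

-- ===== VERDICT (by name: the statement is the Claim_ definition above) =====
theorem get_sorted_rpes_spec : Claim_equal_get_sorted_rpes := by
  intro rpes ooc links _hdom hpre
  unfold Spec_get_sorted_rpes
  exact AB_eq rpes ooc links hpre
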